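-- pv_equiv track=rewrite | github.com/AAnzel/Polar-Diagrams-for-Model-Comparison | Source/polar_diagrams/src/polar_diagrams/polar_diagrams.py | _dict_calculate_model_colors
-- ===== SOURCE A (Python) =====
-- _LIST_TABLEAU_10 = ['#1f77b4', '#2ca02c', '#7f7f7f', '#8c564b', '#17becf',
--                     '#9467bd', '#bcbd22', '#d62728', '#e377c2', '#ff7f0e']
--
-- _LIST_TABLEAU_20 = ['#1f77b4', '#aec7e8', '#ff7f0e', '#ffbb78', '#2ca02c',
--                     '#98df8a', '#d62728', '#ff9896', '#9467bd', '#c5b0d5',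
--                     '#8c564b', '#c49c94', '#e377c2', '#f7b6d2', '#7f7f7f',
--                     '#c7c7c7', '#bcbd22', '#dbdb8d', '#17becf', '#9edae5']
--
-- def _tuple_hex_to_rgb(string_hex_color):
--     """
--     _tuple_hex_to_rgb converts color value given in hex format to rgba format
--     with float_alpha_opacity opacity (transperancy) value
--
--     Args:
--         string_hex_color (str): This argument contains the hex value of the
--           color.
--
--     Returns:
--         tuple: The return value is a tuple (R, G, B) where R, G, B are
--           integer values from 0 to 255.
--     """
--     return tuple(
--         [int(string_hex_color.lstrip('#')[int_i:int_i+2], 16)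
--          for int_i in (0, 2, 4)])
--
-- def _dict_calculate_model_colors(list_model_names, string_reference_model,
--                                  int_number_of_datasets):
--     """
--     _dict_calculate_model_colors defines an RGBA color for each model parsed in
--     the list_model_names. The reference model is always black.
--
--     Args:
--         list_model_names (list): This list contains the strings of model names.
--         string_reference_model (str): This string contains the name of the
--           model present in the df_input argument (as a column) which can be
--           considered as a reference point in the final diagram. This is often
--           the ground truth.
--         int_number_of_datasets (int): This argument contains the number of
--           datasets. This argument is important if we have two datasets where
--           the second one is another version of the first dataset.
--
--     Returns:
--         dict: The function returns a dictionary where model strings are keys,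
--           and values are RGBA tuples.
--     """
--     int_number_of_models = len(list_model_names)
--
--     if int_number_of_models <= 9:
--         list_color_scheme = _LIST_TABLEAU_10
--     else:
--         list_color_scheme = _LIST_TABLEAU_20
--     int_num_discrete_colors = len(list_color_scheme)
--
--     dict_result = dict()
--
--     for int_i in range(int_number_of_datasets):
--         for int_j, string_model_name in enumerate(list_model_names):
--             if string_model_name == string_reference_model:
--                 string_hex_color = '#000000'
--             else:
--                 string_hex_color = list_color_scheme[
--                     int_j % int_num_discrete_colors]
--
--             if string_model_name not in dict_result:
--                 dict_result[string_model_name] = dict()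
--
--             tuple_rgb_color = _tuple_hex_to_rgb(string_hex_color)
--             dict_result[string_model_name][int_i] = (
--                 int(tuple_rgb_color[0]), int(tuple_rgb_color[1]),
--                 int(tuple_rgb_color[2]))
--
--     return dict_result
-- ===== SOURCE B (Python) =====
-- _LIST_TABLEAU_10 = ['#1f77b4', '#2ca02c', '#7f7f7f', '#8c564b', '#17becf',
--                     '#9467bd', '#bcbd22', '#d62728', '#e377c2', '#ff7f0e']
--
-- _LIST_TABLEAU_20 = ['#1f77b4', '#aec7e8', '#ff7f0e', '#ffbb78', '#2ca02c',
--                     '#98df8a', '#d62728', '#ff9896', '#9467bd', '#c5b0d5',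
--                     '#8c564b', '#c49c94', '#e377c2', '#f7b6d2', '#7f7f7f',
--                     '#c7c7c7', '#bcbd22', '#dbdb8d', '#17becf', '#9edae5']
--
--
-- def _tuple_hex_to_rgb(string_hex_color):
--     return tuple(
--         [int(string_hex_color.lstrip('#')[int_i:int_i+2], 16)
--          for int_i in (0, 2, 4)])
--
--
-- def _dict_calculate_model_colors(list_model_names, string_reference_model,
--                                  int_number_of_datasets):
--     list_color_scheme = (_LIST_TABLEAU_10 if len(list_model_names) <= 9
--                          else _LIST_TABLEAU_20)
--     if int_number_of_datasets <= 0: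
--         return {}
--     # One pass over the names: name -> RGB, later duplicates overwrite,
--     # insertion order keeps the first appearance of each name.
--     dict_color_of = {}
--     for int_j, string_model_name in enumerate(list_model_names):
--         dict_color_of[string_model_name] = _tuple_hex_to_rgb(
--             '#000000' if string_model_name == string_reference_model
--             else list_color_scheme[int_j % len(list_color_scheme)])
--     # Second pass over the table: the same color for every dataset index.
--     return {string_model_name:
--             {int_i: tuple_rgb for int_i in range(int_number_of_datasets)}
--             for string_model_name, tuple_rgb in dict_color_of.items()}
-- ===== Notes on version B (the rewrite author's own statement) =====
-- stated objective: alternative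
-- what changed: A fills a nested dict cell-by-cell with datasets x models loops (re-checking membership and re-parsing the hex color for every cell); B builds a name->RGB table in one overwrite pass over the names and then emits the per-dataset inner dicts from that table in a second, differently-shaped pass.
import Mathlib
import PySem

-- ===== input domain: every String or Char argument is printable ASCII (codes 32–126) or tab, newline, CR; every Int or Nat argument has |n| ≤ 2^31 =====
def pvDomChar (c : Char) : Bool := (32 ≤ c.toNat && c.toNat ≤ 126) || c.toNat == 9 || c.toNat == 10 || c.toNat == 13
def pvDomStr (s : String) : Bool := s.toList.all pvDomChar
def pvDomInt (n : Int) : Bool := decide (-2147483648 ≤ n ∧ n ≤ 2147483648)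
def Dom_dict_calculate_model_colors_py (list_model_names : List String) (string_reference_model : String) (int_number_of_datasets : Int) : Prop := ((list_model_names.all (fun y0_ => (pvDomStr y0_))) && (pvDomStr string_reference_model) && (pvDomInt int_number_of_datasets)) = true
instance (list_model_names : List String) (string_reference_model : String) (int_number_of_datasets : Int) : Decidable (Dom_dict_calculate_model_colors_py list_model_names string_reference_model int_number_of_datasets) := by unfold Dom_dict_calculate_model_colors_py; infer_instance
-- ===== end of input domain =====

-- B replaces A's datasets×models nested dict-building loops by one table pass over the
-- names followed by a comprehension over the table (alternative decomposition).

-- ===== PORT A =====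
def pvTableau10 : List String := ["#1f77b4", "#2ca02c", "#7f7f7f", "#8c564b", "#17becf",
  "#9467bd", "#bcbd22", "#d62728", "#e377c2", "#ff7f0e"]

def pvTableau20 : List String := ["#1f77b4", "#aec7e8", "#ff7f0e", "#ffbb78", "#2ca02c",
  "#98df8a", "#d62728", "#ff9896", "#9467bd", "#c5b0d5",
  "#8c564b", "#c49c94", "#e377c2", "#f7b6d2", "#7f7f7f",
  "#c7c7c7", "#bcbd22", "#dbdb8d", "#17becf", "#9edae5"]

-- _tuple_hex_to_rgb: s.lstrip('#') is dropWhile (· == '#') (exact: lstrip with the one-char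
-- set '#'); int(.., 16) via PySem.Int.ofCharsBase?; every caller passes a 6-hex-digit color
-- literal, so the parse succeeds and the `.getD 0` default is unreachable.
def tuple_hex_to_rgb (string_hex_color : String) : Int × Int × Int :=
  let stripped : List Char := string_hex_color.toList.dropWhile (· == '#')
  let f : Int → Int := fun int_i =>
    (PySem.Int.ofCharsBase? (PySem.List.slice stripped (some int_i) (some (int_i + 2))) 16).getD 0
  (f 0, f 2, f 4)

def dict_calculate_model_colors_py (list_model_names : List String) (string_reference_model : String) (int_number_of_datasets : Int) : List (String × List (Int × Int × Int × Int)) :=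
  let list_color_scheme := if list_model_names.length ≤ 9 then pvTableau10 else pvTableau20
  let int_num_discrete_colors : Int := (list_color_scheme.length : Int)
  let dict_result : PySem.Dict String (PySem.Dict Int (Int × Int × Int)) :=
    (PySem.List.pyRange 0 int_number_of_datasets 1).foldl (fun d int_i =>
      (PySem.List.enumerate list_model_names).foldl (fun d p =>
        let string_hex_color :=
          if p.2 == string_reference_model then "#000000"
          -- scheme[j % num]: 0 ≤ j % num < num so the pyGetD default "" is unreachable
          else PySem.List.pyGetD list_color_scheme (PySem.Int.mod p.1 int_num_discrete_colors) ""
        let d := if d.contains p.2 then d else d.insert p.2 PySem.Dict.empty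
        let tuple_rgb_color := tuple_hex_to_rgb string_hex_color
        -- dict_result[name][int_i] = (r, g, b): in-place update of the inner dict
        d.modify p.2 PySem.Dict.empty (fun inner => inner.insert int_i tuple_rgb_color))
        d)
      PySem.Dict.empty
  dict_result.items.map (fun q => (q.1, q.2.items))

-- ===== PORT B =====
def dict_calculate_model_colors_py_alt (list_model_names : List String) (string_reference_model : String) (int_number_of_datasets : Int) : List (String × List (Int × Int × Int × Int)) :=
  let list_color_scheme := if list_model_names.length ≤ 9 then pvTableau10 else pvTableau20
  if int_number_of_datasets ≤ 0 then []
  else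
    let dict_color_of : PySem.Dict String (Int × Int × Int) :=
      (PySem.List.enumerate list_model_names).foldl (fun t p =>
        t.insert p.2 (tuple_hex_to_rgb
          (if p.2 == string_reference_model then "#000000"
           else PySem.List.pyGetD list_color_scheme
             (PySem.Int.mod p.1 (list_color_scheme.length : Int)) "")))
        PySem.Dict.empty
    dict_color_of.items.map (fun q =>
      (q.1, (PySem.List.pyRange 0 int_number_of_datasets 1).map (fun int_i => (int_i, q.2))))

-- ===== PRECONDITION & SPEC =====
def Spec_dict_calculate_model_colors_py (list_model_names : List String) (string_reference_model : String) (int_number_of_datasets : Int) (out : List (String × List (Int × Int × Int × Int))) : Prop := out = dict_calculate_model_colors_py_alt list_model_names string_reference_model int_number_of_datasets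
instance (list_model_names : List String) (string_reference_model : String) (int_number_of_datasets : Int) (out : List (String × List (Int × Int × Int × Int))) : Decidable (Spec_dict_calculate_model_colors_py list_model_names string_reference_model int_number_of_datasets out) := by unfold Spec_dict_calculate_model_colors_py; infer_instance

-- ===== CLAIM (what is proved, stated in full; the proofs are below) =====
def Claim_equal_dict_calculate_model_colors_py : Prop := ∀ (list_model_names : List String) (string_reference_model : String) (int_number_of_datasets : Int), Dom_dict_calculate_model_colors_py list_model_names string_reference_model int_number_of_datasets → Spec_dict_calculate_model_colors_py list_model_names string_reference_model int_number_of_datasets (dict_calculate_model_colors_py list_model_names string_reference_model int_number_of_datasets)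

-- ===== LEMMAS AND PROOFS =====

-- the color of the LAST occurrence of a name (what both overwrite loops converge to)
def pvLastColor (c : Int × String → Int × Int × Int) (l : List (Int × String)) (nm : String) : Int × Int × Int :=
  ((l.filter (fun p => p.2 == nm)).getLast?).elim (0, 0, 0) c

theorem pv_getLast?_cons_ne_none {α : Type} (q : α) (qs : List α) : (q :: qs).getLast? ≠ none := by
  simp

-- B's overwrite loop: lookup after the fold = value of the last occurrence
theorem pv_getD_foldl_insert (c : Int × String → Int × Int × Int)
    (l : List (Int × String)) (t : PySem.Dict String (Int × Int × Int)) (nm : String)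
    (dflt : Int × Int × Int) :
    (l.foldl (fun t p => t.insert p.2 (c p)) t).getD nm dflt =
      ((l.filter (fun p => p.2 == nm)).getLast?).elim (t.getD nm dflt) c := by
  induction l generalizing t with
  | nil => simp
  | cons p l ih =>
    simp only [List.foldl_cons, ih, List.filter_cons]
    by_cases h : (p.2 == nm) = true
    · have he : p.2 = nm := by simpa using h
      rw [if_pos h]
      rcases hf : l.filter (fun q => q.2 == nm) with _ | ⟨q, qs⟩
      · subst he
        simp [hf, PySem.Dict.getD_insert_self]
      · have hr : (p :: q :: qs).getLast? = (q :: qs).getLast? := List.getLast?_cons_cons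
        simp only [hf, hr]
        rcases hl : (q :: qs).getLast? with _ | r
        · exact absurd hl (pv_getLast?_cons_ne_none q qs)
        · simp
    · rw [if_neg h]
      have he : nm ≠ p.2 := fun hh => h (by simp [hh])
      rw [PySem.Dict.getD_insert_of_ne _ _ _ he]

-- A's inner pass, step rewritten below to this insert form: lookup after one pass
theorem pv_getD_pass (c : Int × String → Int × Int × Int) (i : Int)
    (l : List (Int × String)) (d : PySem.Dict String (PySem.Dict Int (Int × Int × Int)))
    (nm : String) :
    (l.foldl (fun d p => d.insert p.2 ((d.getD p.2 PySem.Dict.empty).insert i (c p))) d).getD nm PySem.Dict.empty =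
      ((l.filter (fun p => p.2 == nm)).getLast?).elim (d.getD nm PySem.Dict.empty)
        (fun p => (d.getD nm PySem.Dict.empty).insert i (c p)) := by
  induction l generalizing d with
  | nil => simp
  | cons p l ih =>
    simp only [List.foldl_cons, ih, List.filter_cons]
    by_cases h : (p.2 == nm) = true
    · have he : p.2 = nm := by simpa using h
      subst he
      rw [if_pos h]
      rcases hf : l.filter (fun q => q.2 == p.2) with _ | ⟨q, qs⟩
      · simp [hf, PySem.Dict.getD_insert_self]
      · have hr : (p :: q :: qs).getLast? = (q :: qs).getLast? := List.getLast?_cons_cons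
        simp only [hf, hr]
        rcases hl : (q :: qs).getLast? with _ | r
        · exact absurd hl (pv_getLast?_cons_ne_none q qs)
        · simp [PySem.Dict.getD_insert_self, PySem.Dict.insert_insert_self]
    · rw [if_neg h]
      have he : nm ≠ p.2 := fun hh => h (by simp [hh])
      rw [PySem.Dict.getD_insert_of_ne _ _ _ he]

-- A's step (contains-check + in-place inner update) IS an overwrite insert
theorem pv_stepA_eq (i : Int) (c : Int × String → Int × Int × Int)
    (d : PySem.Dict String (PySem.Dict Int (Int × Int × Int))) (p : Int × String) :
    (let d' := if d.contains p.2 then d else d.insert p.2 PySem.Dict.empty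
     d'.modify p.2 PySem.Dict.empty (fun inner => inner.insert i (c p))) =
      d.insert p.2 ((d.getD p.2 PySem.Dict.empty).insert i (c p)) := by
  have hmod : ∀ (e : PySem.Dict String (PySem.Dict Int (Int × Int × Int))),
      e.modify p.2 PySem.Dict.empty (fun inner => inner.insert i (c p)) =
        e.insert p.2 ((e.getD p.2 PySem.Dict.empty).insert i (c p)) := fun _ => rfl
  by_cases h : d.contains p.2
  · simp [h, hmod]
  · have h' : d.contains p.2 = false := by simpa using h
    simp only [h, Bool.false_eq_true, if_false, hmod]
    rw [PySem.Dict.getD_insert_self, PySem.Dict.insert_insert_self,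
        PySem.Dict.getD_of_not_contains _ _ h']

-- Set.update adds nothing when every element is already present
theorem pv_set_update_of_subset (s : PySem.Set String) (l : List String)
    (h : ∀ x ∈ l, x ∈ s) : PySem.Set.update s l = s := by
  induction l generalizing s with
  | nil => rfl
  | cons x l ih =>
    rw [PySem.Set.update_cons, PySem.Set.add_of_mem (h x (by simp))]
    exact ih s (fun y hy => h y (by simp [hy]))

-- the invariant of A's outer loop over the dataset indices (any nonempty index list)
set_option maxRecDepth 4000 in
theorem pv_outer_inv (c : Int × String → Int × Int × Int) (names : List String)
    (is : List Int) (hne : is ≠ []) :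
    (is.foldl (fun d i =>
        (PySem.List.enumerate names).foldl
          (fun d p => d.insert p.2 ((d.getD p.2 PySem.Dict.empty).insert i (c p))) d)
      PySem.Dict.empty).keys = PySem.Set.ofList names ∧
    (is.foldl (fun d i =>
        (PySem.List.enumerate names).foldl
          (fun d p => d.insert p.2 ((d.getD p.2 PySem.Dict.empty).insert i (c p))) d)
      PySem.Dict.empty).keys.Nodup ∧
    ∀ nm ∈ names,
      (is.foldl (fun d i =>
          (PySem.List.enumerate names).foldl
            (fun d p => d.insert p.2 ((d.getD p.2 PySem.Dict.empty).insert i (c p))) d)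
        PySem.Dict.empty).getD nm PySem.Dict.empty =
        is.foldl (fun inn i => inn.insert i (pvLastColor c (PySem.List.enumerate names) nm))
          PySem.Dict.empty := by
  induction is using List.reverseRecOn with
  | nil => exact absurd rfl hne
  | append_singleton is i ih =>
    have hmemfilter : ∀ nm ∈ names,
        (PySem.List.enumerate names).filter (fun p => p.2 == nm) ≠ [] := by
      intro nm hnm
      have : nm ∈ (PySem.List.enumerate names).map (·.2) := by
        rw [PySem.List.map_snd_enumerate]; exact hnm
      rcases List.mem_map.mp this with ⟨p, hp, hpe⟩
      intro hnilf
      have : p ∈ (PySem.List.enumerate names).filter (fun q => q.2 == nm) :=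
        List.mem_filter.mpr ⟨hp, by simp [hpe]⟩
      simp [hnilf] at this
    rcases List.eq_nil_or_concat' is with h0 | ⟨js, j, hj⟩
    · subst h0
      simp only [List.nil_append, List.foldl_cons, List.foldl_nil]
      refine ⟨?_, ?_, ?_⟩
      · rw [PySem.Dict.keys_foldl_insert_key (PySem.List.enumerate names) (fun p => p.2)
              (fun d p => (d.getD p.2 PySem.Dict.empty).insert i (c p)) PySem.Dict.empty,
            PySem.Dict.keys_empty, PySem.Set.update_nil_left, PySem.List.map_snd_enumerate]
      · exact PySem.Dict.nodup_keys_foldl_insert_key (PySem.List.enumerate names) (fun p => p.2)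
          (fun d p => (d.getD p.2 PySem.Dict.empty).insert i (c p)) PySem.Dict.empty (by simp)
      · intro nm hnm
        rw [pv_getD_pass]
        rcases hf : (PySem.List.enumerate names).filter (fun p => p.2 == nm) with _ | ⟨q, qs⟩
        · exact absurd hf (hmemfilter nm hnm)
        · simp only [Option.elim, PySem.Dict.getD_empty, pvLastColor, hf]
          rcases hl : (q :: qs).getLast? with _ | r
          · exact absurd hl (pv_getLast?_cons_ne_none q qs)
          · simp
    · have hne' : is ≠ [] := by rw [hj]; simp
      obtain ⟨hk, hnd, hg⟩ := ih hne'
      rw [List.foldl_append] at *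
      simp only [List.foldl_cons, List.foldl_nil]
      refine ⟨?_, ?_, ?_⟩
      · rw [PySem.Dict.keys_foldl_insert_key (PySem.List.enumerate names) (fun p => p.2)
              (fun d p => (d.getD p.2 PySem.Dict.empty).insert i (c p)) _, hk,
            PySem.List.map_snd_enumerate]
        exact pv_set_update_of_subset _ _ (fun x hx => by
          simpa [PySem.Set.mem_ofList] using hx)
      · exact PySem.Dict.nodup_keys_foldl_insert_key (PySem.List.enumerate names) (fun p => p.2)
          (fun d p => (d.getD p.2 PySem.Dict.empty).insert i (c p)) _ hnd
      · intro nm hnm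
        rw [pv_getD_pass, List.foldl_append]
        simp only [List.foldl_cons, List.foldl_nil]
        rcases hf : (PySem.List.enumerate names).filter (fun p => p.2 == nm) with _ | ⟨q, qs⟩
        · exact absurd hf (hmemfilter nm hnm)
        · simp only [Option.elim, pvLastColor, hf]
          rcases hl : (q :: qs).getLast? with _ | r
          · exact absurd hl (pv_getLast?_cons_ne_none q qs)
          · simp [hg nm hnm, pvLastColor, hf, hl]

-- ===== VERDICT (by name: the statement is the Claim_ definition above) =====
theorem dict_calculate_model_colors_py_spec : Claim_equal_dict_calculate_model_colors_py := by
  intro names ref n _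
  unfold Spec_dict_calculate_model_colors_py
  by_cases hn : n ≤ 0
  · have hr : PySem.List.pyRange 0 n 1 = [] := by
      rw [PySem.List.pyRange_one]
      have h0 : (n - 0).toNat = 0 := by omega
      rw [h0]
      rfl
    simp only [dict_calculate_model_colors_py, dict_calculate_model_colors_py_alt, hr,
      List.foldl_nil, if_pos hn]
    rfl
  · have hne : PySem.List.pyRange 0 n 1 ≠ [] := by
      intro h0
      have hl := PySem.List.length_pyRange_one 0 n
      rw [h0] at hl
      simp at hl
      omega
    simp only [dict_calculate_model_colors_py, dict_calculate_model_colors_py_alt]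
    rw [if_neg hn]
    generalize (if names.length ≤ 9 then pvTableau10 else pvTableau20) = scheme
    -- rewrite A's inner step into pure-insert form
    have hstep : (fun (d : PySem.Dict String (PySem.Dict Int (Int × Int × Int))) (int_i : Int) =>
        (PySem.List.enumerate names).foldl (fun d p =>
          (if d.contains p.2 then d else d.insert p.2 PySem.Dict.empty).modify p.2 PySem.Dict.empty
            (fun inner => inner.insert int_i (tuple_hex_to_rgb (if p.2 == ref then "#000000"
           else PySem.List.pyGetD scheme (PySem.Int.mod p.1 (scheme.length : Int)) "")))) d) =
        (fun d i => (PySem.List.enumerate names).foldl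
          (fun d p => d.insert p.2 ((d.getD p.2 PySem.Dict.empty).insert i
            (tuple_hex_to_rgb (if p.2 == ref then "#000000"
           else PySem.List.pyGetD scheme (PySem.Int.mod p.1 (scheme.length : Int)) "")))) d) := by
      funext d i
      exact congrFun (congrFun (congrArg List.foldl (funext fun d => funext fun p =>
        pv_stepA_eq i (fun p => tuple_hex_to_rgb (if p.2 == ref then "#000000"
           else PySem.List.pyGetD scheme (PySem.Int.mod p.1 (scheme.length : Int)) "")) d p)) d) (PySem.List.enumerate names)
    rw [hstep]
    obtain ⟨hk, hnd, hg⟩ := pv_outer_inv (fun p => tuple_hex_to_rgb (if p.2 == ref then "#000000"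
           else PySem.List.pyGetD scheme (PySem.Int.mod p.1 (scheme.length : Int)) "")) names (PySem.List.pyRange 0 n 1) hne
    -- A's items
    rw [PySem.Dict.items_eq_map_keys _ hnd PySem.Dict.empty, hk]
    -- B's items
    have hbk : ((PySem.List.enumerate names).foldl
        (fun t p => t.insert p.2 (tuple_hex_to_rgb (if p.2 == ref then "#000000"
           else PySem.List.pyGetD scheme (PySem.Int.mod p.1 (scheme.length : Int)) ""))) PySem.Dict.empty).keys = PySem.Set.ofList names := by
      rw [PySem.Dict.keys_foldl_insert_key (PySem.List.enumerate names) (fun p => p.2)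
            (fun _ p => tuple_hex_to_rgb (if p.2 == ref then "#000000"
           else PySem.List.pyGetD scheme (PySem.Int.mod p.1 (scheme.length : Int)) "")) PySem.Dict.empty, PySem.Dict.keys_empty,
          PySem.Set.update_nil_left, PySem.List.map_snd_enumerate]
    have hbnd := PySem.Dict.nodup_keys_foldl_insert_key (PySem.List.enumerate names) (fun p => p.2)
      (fun _ p => tuple_hex_to_rgb (if p.2 == ref then "#000000"
           else PySem.List.pyGetD scheme (PySem.Int.mod p.1 (scheme.length : Int)) "")) PySem.Dict.empty (by simp)
    rw [PySem.Dict.items_eq_map_keys _ hbnd (0, 0, 0), hbk]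
    rw [List.map_map, List.map_map]
    apply List.map_congr_left
    intro nm hnm
    have hnm' : nm ∈ names := by simpa [PySem.Set.mem_ofList] using hnm
    simp only [Function.comp]
    rw [hg nm hnm', pv_getD_foldl_insert (fun p => tuple_hex_to_rgb (if p.2 == ref then "#000000"
           else PySem.List.pyGetD scheme (PySem.Int.mod p.1 (scheme.length : Int)) "")) (PySem.List.enumerate names)
      PySem.Dict.empty nm (0, 0, 0)]
    -- inner dict items: fresh distinct int keys append in order
    have hfresh : ∀ i ∈ PySem.List.pyRange 0 n 1,
        (PySem.Dict.empty : PySem.Dict Int (Int × Int × Int)).contains i = false := by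
      simp
    have hndk : ((PySem.List.pyRange 0 n 1).map (fun i => i)).Nodup := by
      simpa using PySem.List.nodup_pyRange_one 0 n
    rw [PySem.Dict.items_foldl_insert_fresh (PySem.List.pyRange 0 n 1) (fun i => i)
      (fun _ => pvLastColor (fun p => tuple_hex_to_rgb (if p.2 == ref then "#000000"
           else PySem.List.pyGetD scheme (PySem.Int.mod p.1 (scheme.length : Int)) "")) (PySem.List.enumerate names) nm)
      PySem.Dict.empty hfresh hndk]
    have hie : (PySem.Dict.empty : PySem.Dict Int (Int × Int × Int)).items = [] := rfl
    rw [hie, List.nil_append]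
    -- both second components are the color of nm's last occurrence
    have hcol : pvLastColor (fun p => tuple_hex_to_rgb (if p.2 == ref then "#000000"
           else PySem.List.pyGetD scheme (PySem.Int.mod p.1 (scheme.length : Int)) "")) (PySem.List.enumerate names) nm =
        (((PySem.List.enumerate names).filter (fun p => p.2 == nm)).getLast?).elim
          ((PySem.Dict.empty : PySem.Dict String (Int × Int × Int)).getD nm (0, 0, 0))
          (fun p => tuple_hex_to_rgb (if p.2 == ref then "#000000"
           else PySem.List.pyGetD scheme (PySem.Int.mod p.1 (scheme.length : Int)) "")) := by
      unfold pvLastColor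
      rcases hf : (PySem.List.enumerate names).filter (fun p => p.2 == nm) with _ | ⟨q, qs⟩
      · -- nm ∈ names, so the filter is nonempty
        exfalso
        have hm : nm ∈ (PySem.List.enumerate names).map (fun p => p.2) := by
          rw [PySem.List.map_snd_enumerate]; exact hnm'
        rcases List.mem_map.mp hm with ⟨p, hp, hpe⟩
        have hpf : p ∈ (PySem.List.enumerate names).filter (fun q => q.2 == nm) :=
          List.mem_filter.mpr ⟨hp, by simp [hpe]⟩
        simp [hf] at hpf
      · rcases hl : (q :: qs).getLast? with _ | r
        · exact absurd hl (pv_getLast?_cons_ne_none q qs)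
        · simp
    rw [hcol]
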